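-- pv_equiv track=rewrite | github.com/lucas-rus/Theoretical_and_Experimental_Comparison_of_SAT_Solving_Algorithms | SAT_Solving_Benchmark.py | dp_solver
-- ===== SOURCE A (Python) =====
-- def dp_solver(clauses, num_vars):
--     def dp(cnf, vars_left):
--         if not cnf:
--             return True
--         if [] in cnf:
--             return False
--         if not vars_left:
--             return True
--         v = vars_left[0]
--         new_vars = vars_left[1:]
--         for val in [v, -v]:
--             new_cnf = []
--             for clause in cnf:
--                 if val in clause:
--                     continue
--                 new_clause = [lit for lit in clause if lit != -val]
--                 new_cnf.append(new_clause)
--             if dp(new_cnf, new_vars):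
--                 return True
--         return False
--     return dp(clauses, list(range(1, num_vars + 1)))
-- ===== SOURCE B (Python) =====
-- def dp_solver(clauses, num_vars):
--     # Iterative DFS over an explicit stack of (cnf, vars_left) states
--     # instead of A's nested recursion; same clause-reduction rule.
--     def reduce(cnf, val):
--         return [[lit for lit in clause if lit != -val]
--                 for clause in cnf if val not in clause]
--
--     stack = [(clauses, list(range(1, num_vars + 1)))]
--     while stack:
--         cnf, vars_left = stack.pop()
--         if not cnf:
--             return True
--         if [] in cnf:
--             continue
--         if not vars_left:
--             return True
--         v = vars_left[0]
--         rest = vars_left[1:]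
--         stack.append((reduce(cnf, -v), rest))
--         stack.append((reduce(cnf, v), rest))
--     return False
-- ===== Notes on version B (the rewrite author's own statement) =====
-- stated objective: alternative
-- what changed: Replaced the nested recursive DPLL with an iterative depth-first search over an explicit stack of (cnf, vars_left) states, with clause reduction done by a comprehension helper instead of an accumulation loop.
import Mathlib
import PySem

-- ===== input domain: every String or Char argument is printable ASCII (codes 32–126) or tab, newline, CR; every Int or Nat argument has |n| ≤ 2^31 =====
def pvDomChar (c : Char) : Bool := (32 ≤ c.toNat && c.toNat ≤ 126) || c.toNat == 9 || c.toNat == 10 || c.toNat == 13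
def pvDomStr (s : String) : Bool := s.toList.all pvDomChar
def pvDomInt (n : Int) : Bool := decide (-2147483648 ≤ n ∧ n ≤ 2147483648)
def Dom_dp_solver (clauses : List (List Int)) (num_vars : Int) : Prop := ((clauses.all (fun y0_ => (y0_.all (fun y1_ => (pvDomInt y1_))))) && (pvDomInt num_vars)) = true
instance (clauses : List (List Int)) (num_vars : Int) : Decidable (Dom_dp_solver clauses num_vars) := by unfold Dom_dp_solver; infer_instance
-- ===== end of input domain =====

-- B replaces A's recursive DPLL by an iterative DFS over an explicit stack of
-- (cnf, vars_left) states (alternative decomposition, same cost).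


-- ===== PORT A =====
-- inner recursive dp: structural recursion on vars_left
def dpA (cnf : List (List Int)) (vars_left : List Int) : Bool :=
  if cnf.isEmpty then true
  else if cnf.contains ([] : List Int) then false
  else
    match vars_left with
    | [] => true
    | v :: new_vars =>
      -- for val in [v, -v]: build new_cnf by the accumulation loop, recurse, early-return on true
      [v, -v].any (fun val =>
        dpA (cnf.foldl (fun new_cnf clause =>
              if clause.contains val then new_cnf
              else new_cnf ++ [clause.filter (fun lit => lit ≠ -val)]) [])
            new_vars)

def dp_solver (clauses : List (List Int)) (num_vars : Int) : Bool :=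
  dpA clauses (PySem.List.pyRange 1 (num_vars + 1) 1)

-- ===== PORT B =====
def reduceB (cnf : List (List Int)) (val : Int) : List (List Int) :=
  (cnf.filter (fun clause => ¬ clause.contains val)).map
    (fun clause => clause.filter (fun lit => lit ≠ -val))

def stkMeasure (stack : List (List (List Int) × List Int)) : Nat :=
  (stack.map (fun s => 3 ^ s.2.length)).sum

-- the while loop over the explicit stack (head = top of stack)
def loopB (stack : List (List (List Int) × List Int)) : Bool :=
  match stack with
  | [] => false
  | (cnf, vars_left) :: rest =>
    if cnf.isEmpty then true
    else if cnf.contains ([] : List Int) then loopB rest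
    else
      match vars_left with
      | [] => true
      | v :: vs => loopB ((reduceB cnf v, vs) :: (reduceB cnf (-v), vs) :: rest)
termination_by stkMeasure stack
decreasing_by
  · simp only [stkMeasure, List.map_cons, List.sum_cons]
    have : 1 ≤ 3 ^ vars_left.length := Nat.one_le_pow _ _ (by norm_num)
    omega
  · simp only [stkMeasure, List.map_cons, List.sum_cons, List.length_cons, pow_succ]
    have : 1 ≤ 3 ^ vs.length := Nat.one_le_pow _ _ (by norm_num)
    omega

def dp_solver_alt (clauses : List (List Int)) (num_vars : Int) : Bool :=
  loopB [(clauses, PySem.List.pyRange 1 (num_vars + 1) 1)]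

-- ===== PRECONDITION & SPEC =====
def Spec_dp_solver (clauses : List (List Int)) (num_vars : Int) (out : Bool) : Prop := out = dp_solver_alt clauses num_vars
instance (clauses : List (List Int)) (num_vars : Int) (out : Bool) : Decidable (Spec_dp_solver clauses num_vars out) := by unfold Spec_dp_solver; infer_instance

-- ===== CLAIM (what is proved, stated in full; the proofs are below) =====
def Claim_equal_dp_solver : Prop := ∀ (clauses : List (List Int)) (num_vars : Int), Dom_dp_solver clauses num_vars → Spec_dp_solver clauses num_vars (dp_solver clauses num_vars)

-- ===== LEMMAS AND PROOFS =====

-- A's accumulation loop builds exactly B's filter-then-map reduction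
theorem foldl_eq_reduceB (cnf : List (List Int)) (val : Int) (acc : List (List Int)) :
    cnf.foldl (fun new_cnf clause =>
        if clause.contains val then new_cnf
        else new_cnf ++ [clause.filter (fun lit => lit ≠ -val)]) acc
      = acc ++ reduceB cnf val := by
  induction cnf generalizing acc with
  | nil => simp [reduceB]
  | cons c cs ih =>
    simp only [List.foldl_cons]
    by_cases h : c.contains val
    · rw [if_pos h, ih]
      have h' : val ∈ c := by simpa using h
      simp [reduceB, List.filter_cons, h']
    · rw [if_neg h, ih]
      have h' : ¬ val ∈ c := by simpa using h
      simp [reduceB, List.filter_cons, h']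

-- the stack loop decides whether some stacked state is dpA-satisfiable
theorem loopB_eq_any (stack : List (List (List Int) × List Int)) :
    loopB stack = stack.any (fun s => dpA s.1 s.2) := by
  induction stack using loopB.induct with
  | case1 => simp [loopB]
  | case2 cnf vars_left rest h =>
    rw [loopB.eq_def]
    simp only [List.any_cons]
    rw [dpA.eq_def]
    simp [h]
  | case3 cnf vars_left rest h1 h2 ih =>
    have h2' : [] ∈ cnf := by simpa using h2
    rw [loopB.eq_def]
    simp only [List.any_cons]
    rw [dpA.eq_def]
    simp [h1, h2', ih]
  | case4 cnf rest h1 h2 =>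
    have h2' : ¬([] ∈ cnf) := by simpa using h2
    rw [loopB.eq_def]
    simp only [List.any_cons]
    rw [dpA.eq_def]
    simp [h1, h2']
  | case5 cnf rest h1 h2 v vs ih =>
    have h2' : ¬([] ∈ cnf) := by simpa using h2
    rw [loopB.eq_def]
    simp only [List.any_cons]
    rw [dpA.eq_def]
    simp only [foldl_eq_reduceB, List.nil_append]
    simp [h1, h2', ih, Bool.or_assoc]

-- ===== VERDICT (by name: the statement is the Claim_ definition above) =====
theorem dp_solver_spec : Claim_equal_dp_solver := by
  intro clauses num_vars _
  unfold Spec_dp_solver dp_solver dp_solver_alt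
  rw [loopB_eq_any]
  simp
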